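-- pv_equiv track=rewrite | github.com/alo1719/LeetCode | OA/SF.maximum-array-value.py | max_array_val
-- ===== SOURCE A (Python) =====
-- def max_array_val(nums):
--     def can_achieve(nums, max_val):
--         overflow = 0
--         for i in range(len(nums)-1, -1, -1):
--             overflow = max(0, nums[i] + overflow - max_val)
--         return overflow == 0
--
--     low = nums[0]
--     high = max(nums)
--     while low < high:
--         mid = (low + high) // 2
--         if can_achieve(nums, mid):
--             high = mid
--         else:
--             low = mid + 1
--     return low
-- ===== SOURCE B (Python) =====
-- def max_array_val(nums):
--     # single pass: answer = max over i of ceil(prefix_sum(0..i) / (i+1))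
--     ans = nums[0]
--     prefix = 0
--     for i, x in enumerate(nums):
--         prefix += x
--         ans = max(ans, -(-prefix // (i + 1)))
--     return ans
-- ===== Notes on version B (the rewrite author's own statement) =====
-- stated objective: faster
-- what changed: Replaces the binary search over candidate maxima (each step re-scanning the whole array) with a single left-to-right pass taking the maximum of ceil(prefix_sum/(i+1)) over all prefixes.
import Mathlib
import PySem

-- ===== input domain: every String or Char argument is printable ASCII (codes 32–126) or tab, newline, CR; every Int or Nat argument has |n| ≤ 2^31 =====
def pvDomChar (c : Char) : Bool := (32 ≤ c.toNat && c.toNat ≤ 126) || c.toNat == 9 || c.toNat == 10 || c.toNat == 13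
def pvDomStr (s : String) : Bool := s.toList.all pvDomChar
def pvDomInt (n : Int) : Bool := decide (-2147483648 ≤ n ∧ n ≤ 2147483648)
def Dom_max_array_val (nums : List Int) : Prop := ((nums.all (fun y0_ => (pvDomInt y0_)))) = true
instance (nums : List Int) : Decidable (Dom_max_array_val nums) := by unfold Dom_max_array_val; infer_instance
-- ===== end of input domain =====

-- B replaces A's binary search (each probe re-scans the array) with one pass maximising
-- ceil(prefix_sum/(i+1)); objective: faster (O(n) instead of O(n log range)).

-- ===== PORT A =====
-- can_achieve: the right-to-left overflow loop, then `overflow == 0`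
def pvCanAchieve (nums : List Int) (maxVal : Int) : Bool :=
  (nums.foldr (fun x overflow => max 0 (x + overflow - maxVal)) 0) == 0

-- the `while low < high` binary search
def pvBSearch (nums : List Int) (low high : Int) : Int :=
  if _h : low < high then
    let mid := PySem.Int.floordiv (low + high) 2
    if pvCanAchieve nums mid then pvBSearch nums low mid
    else pvBSearch nums (mid + 1) high
  else low
termination_by (high - low).toNat
decreasing_by
  · have hm := PySem.Int.floordiv_eq_ediv_of_pos (a := low + high) (b := 2) (by omega)
    simp only [hm]; omega
  · have hm := PySem.Int.floordiv_eq_ediv_of_pos (a := low + high) (b := 2) (by omega)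
    simp only [hm]; omega

def max_array_val (nums : List Int) : Int :=
  let low := (PySem.List.pyGet? nums 0).getD 0
  let high := ((PySem.List.max? nums (fun y => y)).getD 0)
  pvBSearch nums low high

-- ===== PORT B =====
-- the `for i, x in enumerate(nums)` loop of Source B, threading (i, prefix, ans)
def pvAltLoop (l : List Int) (i pfx ans : Int) : Int :=
  match l with
  | [] => ans
  | x :: xs =>
    pvAltLoop xs (i + 1) (pfx + x)
      (max ans (-(PySem.Int.floordiv (-(pfx + x)) (i + 1))))

def max_array_val_alt (nums : List Int) : Int :=
  match nums with
  | [] => 0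
  | x :: _ => pvAltLoop nums 0 0 x

-- ===== PRECONDITION & SPEC =====
-- A raises IndexError (nums[0]) / ValueError (max) on the empty list, so it is excluded.
def Pre_max_array_val (nums : List Int) : Prop := nums ≠ []
instance (nums : List Int) : Decidable (Pre_max_array_val nums) := by
  unfold Pre_max_array_val; infer_instance

def pvWitness_max_array_val : List Int := [3, -1, 4]

def Spec_max_array_val (nums : List Int) (out : Int) : Prop := out = max_array_val_alt nums
instance (nums : List Int) (out : Int) : Decidable (Spec_max_array_val nums out) := by
  unfold Spec_max_array_val; infer_instance

-- ===== CLAIM (what is proved, stated in full; the proofs are below) =====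
def Claim_equal_max_array_val : Prop := ∀ (nums : List Int), Dom_max_array_val nums → Pre_max_array_val nums → Spec_max_array_val nums (max_array_val nums)

-- ===== LEMMAS AND PROOFS =====

-- max over the nonempty prefixes p of l of (sum p − |p|·m)  (pvMP [] m := 0 is a padding value)
def pvMP (l : List Int) (m : Int) : Int :=
  match l with
  | [] => 0
  | x :: xs => (x - m) + max 0 (pvMP xs m)

theorem pv_foldr_eq_mp (l : List Int) (m : Int) :
    (l.foldr (fun x overflow => max 0 (x + overflow - m)) 0) = max 0 (pvMP l m) := by
  induction l with
  | nil => simp [pvMP]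
  | cons x xs ih => simp only [List.foldr, ih, pvMP]; omega

theorem pv_mp_le (l : List Int) (x m : Int) : ∀ c : Int,
    pvMP (x :: l) m ≤ c ↔
      ∀ k : Nat, k < l.length + 1 → (((x :: l).take (k + 1)).sum) - ((k : Int) + 1) * m ≤ c := by
  induction l generalizing x with
  | nil =>
    intro c
    constructor
    · intro h k hk
      have hk0 : k = 0 := by simp at hk; omega
      subst hk0
      simp [pvMP] at h ⊢
      linarith
    · intro h
      have h0 := h 0 (by omega)
      simp at h0
      simp [pvMP]
      linarith
  | cons y ys ih =>
    intro c
    have hstep : pvMP (x :: y :: ys) m ≤ c ↔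
        (x - m ≤ c ∧ pvMP (y :: ys) m ≤ c - (x - m)) := by
      simp only [pvMP]
      omega
    rw [hstep, ih y (c - (x - m))]
    constructor
    · rintro ⟨h0, hrest⟩ k hk
      match k with
      | 0 =>
        simp
        linarith
      | Nat.succ j =>
        have hj := hrest j (by simp at hk; omega)
        rw [List.take_succ_cons, List.sum_cons]
        push_cast at hj ⊢
        ring_nf at hj ⊢
        linarith
    · intro h
      constructor
      · have h0 := h 0 (by omega)
        simp at h0
        linarith
      · intro j hj
        have hsj := h (j + 1) (by simp; omega)
        rw [List.take_succ_cons, List.sum_cons] at hsj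
        push_cast at hsj ⊢
        ring_nf at hsj ⊢
        linarith

theorem pv_altLoop_le (l : List Int) : ∀ (i s a m : Int), 0 ≤ i →
    (pvAltLoop l i s a ≤ m ↔
      a ≤ m ∧ ∀ k : Nat, k < l.length → s + ((l.take (k + 1)).sum) ≤ (i + (k : Int) + 1) * m) := by
  induction l with
  | nil => intro i s a m _; simp [pvAltLoop]
  | cons x xs ih =>
    intro i s a m hi
    simp only [pvAltLoop]
    rw [ih (i + 1) (s + x) _ m (by omega)]
    have hceil : (-(PySem.Int.floordiv (-(s + x)) (i + 1))) ≤ m ↔ s + x ≤ (i + 1) * m := by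
      constructor
      · intro h
        have h2 : -m ≤ PySem.Int.floordiv (-(s + x)) (i + 1) := by omega
        have := (PySem.Int.le_floordiv_iff_mul_le (a := -(s + x)) (b := i + 1) (q := -m)
          (by omega)).mp h2
        nlinarith [this]
      · intro h
        have h2 : (-m) * (i + 1) ≤ -(s + x) := by nlinarith [h]
        have := (PySem.Int.le_floordiv_iff_mul_le (a := -(s + x)) (b := i + 1) (q := -m)
          (by omega)).mpr h2
        omega
    constructor
    · rintro ⟨hmax, hrest⟩
      rw [max_le_iff] at hmax
      have hCm : s + x ≤ (i + 1) * m := hceil.mp hmax.2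
      refine ⟨hmax.1, ?_⟩
      intro k hk
      match k with
      | 0 =>
        simp
        linarith
      | Nat.succ j =>
        have hj := hrest j (by simp at hk; omega)
        rw [List.take_succ_cons, List.sum_cons]
        push_cast at hj ⊢
        ring_nf at hj ⊢
        linarith
    · rintro ⟨ha, hall⟩
      have h0 := hall 0 (by simp)
      simp at h0
      refine ⟨by rw [max_le_iff]; exact ⟨ha, hceil.mpr (by linarith)⟩, ?_⟩
      intro j hj
      have hsj := hall (j + 1) (by simp; omega)
      rw [List.take_succ_cons, List.sum_cons] at hsj
      push_cast at hsj ⊢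
      ring_nf at hsj ⊢
      linarith

-- the shared characterisation: for nonempty lists, can_achieve m ↔ (B's value) ≤ m
theorem pv_char (x : Int) (xs : List Int) (m : Int) :
    pvCanAchieve (x :: xs) m = true ↔ max_array_val_alt (x :: xs) ≤ m := by
  unfold pvCanAchieve max_array_val_alt
  rw [pv_foldr_eq_mp]
  have h1 : (max 0 (pvMP (x :: xs) m) == 0) = true ↔ pvMP (x :: xs) m ≤ 0 := by
    rw [beq_iff_eq]; omega
  rw [h1, pv_mp_le _ _ _ 0, pv_altLoop_le _ 0 0 x m (by omega)]
  simp only [zero_add, List.length_cons]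
  constructor
  · intro h
    have hx := h 0 (by omega)
    simp at hx
    refine ⟨by linarith, ?_⟩
    intro k hk
    have := h k (by omega)
    linarith
  · rintro ⟨-, h⟩ k hk
    have := h k (by omega)
    linarith

theorem pv_bsearch_eq (nums : List Int) (B : Int)
    (hfeas : ∀ m, pvCanAchieve nums m = true ↔ B ≤ m) :
    ∀ (n : Nat) (low high : Int), (high - low).toNat = n → low ≤ B → B ≤ high →
      pvBSearch nums low high = B := by
  intro n
  induction n using Nat.strong_induction_on with
  | _ n ih =>
    intro low high hn hlo hhi
    rw [pvBSearch]
    split_ifs with hlt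
    · have hm : PySem.Int.floordiv (low + high) 2 = (low + high) / 2 :=
        PySem.Int.floordiv_eq_ediv_of_pos (by omega)
      have hb : low ≤ (low + high) / 2 ∧ (low + high) / 2 < high := by omega
      simp only [hm]
      by_cases hc : pvCanAchieve nums ((low + high) / 2) = true
      · simp only [hc, if_true]
        have hBmid : B ≤ (low + high) / 2 := (hfeas _).mp hc
        exact ih ((low + high) / 2 - low).toNat (by omega) low ((low + high) / 2) rfl hlo hBmid
      · simp only [hc]
        have hBmid : (low + high) / 2 < B := by
          by_contra hcon
          exact hc ((hfeas _).mpr (by omega))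
        exact ih (high - ((low + high) / 2 + 1)).toNat (by omega) ((low + high) / 2 + 1) high rfl
          (by omega) hhi
    · omega

theorem pv_sum_le (l : List Int) (b : Int) (hb : ∀ y ∈ l, y ≤ b) :
    (l.sum) ≤ (l.length : Int) * b := by
  induction l with
  | nil => simp
  | cons x xs ih =>
    have hx := hb x (by simp)
    have hxs := ih (fun y hy => hb y (by simp [hy]))
    simp only [List.sum_cons, List.length_cons]
    push_cast
    nlinarith [hx, hxs]

-- ===== VERDICT (by name: the statement is the Claim_ definition above) =====
theorem max_array_val_spec : Claim_equal_max_array_val := by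
  intro nums _ hpre
  unfold Spec_max_array_val max_array_val
  match nums with
  | [] => exact absurd rfl hpre
  | x :: xs =>
    simp only [PySem.List.pyGet?_zero_cons, PySem.List.max?_id_cons, Option.getD_some]
    set B := max_array_val_alt (x :: xs) with hB
    set hi := List.foldl max x xs with hhi
    have hfeas : ∀ m, pvCanAchieve (x :: xs) m = true ↔ B ≤ m := fun m => pv_char x xs m
    -- low ≤ B : the k = 0 constraint of B ≤ B
    have hchar := (pv_altLoop_le (x :: xs) 0 0 x B (by omega))
    have hself : pvAltLoop (x :: xs) 0 0 x ≤ B := le_of_eq (by rw [hB]; rfl)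
    have hlowB : x ≤ B := (hchar.mp hself).1
    -- B ≤ high : every prefix sum is ≤ length · max
    have hmax := PySem.List.le_foldl_max xs x
    have hmem : ∀ y ∈ x :: xs, y ≤ hi := by
      intro y hy
      rcases List.mem_cons.mp hy with h | h
      · subst h; exact hmax.1
      · exact hmax.2 y h
    have hBhi : B ≤ hi := by
      rw [hB]
      unfold max_array_val_alt
      rw [pv_altLoop_le _ 0 0 x hi (by omega)]
      simp only [zero_add]
      refine ⟨hmem x (by simp), ?_⟩
      intro k hk
      have hlen : ((x :: xs).take (k + 1)).length = k + 1 := by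
        rw [List.length_take]; simp at hk ⊢; omega
      have := pv_sum_le ((x :: xs).take (k + 1)) hi
        (fun y hy => hmem y (List.mem_of_mem_take hy))
      rw [hlen] at this
      push_cast at this
      linarith
    exact pv_bsearch_eq (x :: xs) B hfeas (hi - x).toNat x hi rfl hlowB hBhi
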